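-- pv_equiv track=rewrite | github.com/gomin0/algorithm-study | 프로그래머스/2/42584. 주식가격/주식가격.py | solution
-- ===== SOURCE A (Python) =====
-- def solution(prices):
--     answer = []
--
--     for i in range(len(prices)):
--         price = prices[i]
--         count = -1
--         for j in range(i, len(prices)):
--             if price <= prices[j]:
--                 count += 1
--             else:
--                 count += 1
--                 break
--         answer.append(count)
--     return answer
-- ===== SOURCE B (Python) =====
-- def solution(prices):
--     n = len(prices)
--     answer = [0] * n
--     stack = []  # (index, price); prices non-decreasing from bottom to top
--     for i, p in enumerate(prices):
--         while stack and stack[-1][1] > p: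
--             j, _ = stack.pop()
--             answer[j] = i - j
--         stack.append((i, p))
--     for j, _ in stack:
--         answer[j] = n - 1 - j
--     return answer
-- ===== Notes on version B (the rewrite author's own statement) =====
-- stated objective: faster
-- what changed: Replaces A's quadratic per-index rescan of the remaining suffix by a single left-to-right pass with a monotonic stack of not-yet-dropped (index, price) pairs, writing each duration when its first strictly smaller price arrives.
import Mathlib
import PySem

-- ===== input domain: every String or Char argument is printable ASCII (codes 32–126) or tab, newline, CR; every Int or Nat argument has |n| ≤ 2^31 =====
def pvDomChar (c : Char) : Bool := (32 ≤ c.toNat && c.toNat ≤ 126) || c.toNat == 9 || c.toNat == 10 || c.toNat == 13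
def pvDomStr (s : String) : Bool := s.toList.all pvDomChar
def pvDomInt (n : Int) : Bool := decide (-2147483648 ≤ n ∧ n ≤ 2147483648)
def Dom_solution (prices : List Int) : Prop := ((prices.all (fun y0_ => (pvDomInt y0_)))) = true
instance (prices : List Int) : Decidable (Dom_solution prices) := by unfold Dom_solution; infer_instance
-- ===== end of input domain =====

-- B replaces A's O(n^2) per-index rescans by a single monotonic-stack pass (objective: faster, asymptotic).

-- ===== PORT A =====
-- inner 'for j in range(i, len(prices))' loop with count and break
def countLoop (prices : List Int) (price : Int) : List Int → Int → Int
  | [], count => count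
  | j :: rest, count =>
    if price ≤ PySem.List.pyGetD prices j 0 then
      countLoop prices price rest (count + 1)
    else count + 1

def solution (prices : List Int) : List Int :=
  (PySem.List.pyRange 0 prices.length 1).map (fun i =>
    countLoop prices (PySem.List.pyGetD prices i 0)
      (PySem.List.pyRange i prices.length 1) (-1))

-- ===== PORT B =====
-- the 'while stack and stack[-1][1] > p' pop loop (stack stored top-first)
def popLoop (i p : Int) : List (Int × Int) → List Int → (List (Int × Int) × List Int)
  | [], ans => ([], ans)
  | (j, q) :: rest, ans =>
    if q > p then popLoop i p rest (PySem.List.pySetD ans j (i - j))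
    else ((j, q) :: rest, ans)

def solution_alt (prices : List Int) : List Int :=
  let n : Int := prices.length
  let fin := (PySem.List.enumerate prices 0).foldl
    (fun (st : List (Int × Int) × List Int) (ip : Int × Int) =>
      let s2 := popLoop ip.1 ip.2 st.1 st.2
      ((ip.1, ip.2) :: s2.1, s2.2))
    ([], List.replicate prices.length 0)
  fin.1.foldl (fun ans jq => PySem.List.pySetD ans jq.1 (n - 1 - jq.1)) fin.2

-- ===== PRECONDITION & SPEC =====
def Spec_solution (prices : List Int) (out : List Int) : Prop := out = solution_alt prices
instance (prices : List Int) (out : List Int) : Decidable (Spec_solution prices out) := by unfold Spec_solution; infer_instance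

-- ===== CLAIM (what is proved, stated in full; the proofs are below) =====
def Claim_equal_solution : Prop := ∀ (prices : List Int), Dom_solution prices → Spec_solution prices (solution prices)

-- ===== LEMMAS AND PROOFS =====

-- first index j > i with prices[j] < prices[i]; the answer at i is j-i, else n-1-i
def firstDrop (prices : List Int) (i : Nat) : Option Nat :=
  (List.range' (i+1) (prices.length - (i+1))).find? (fun j => prices.getD j 0 < prices.getD i 0)

def target (prices : List Int) (i : Nat) : Int :=
  match firstDrop prices i with
  | some j => (j : Int) - (i : Int)
  | none => (prices.length : Int) - 1 - (i : Int)

-- j survives on the stack after the first m elements: nothing in (j, m) is smaller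
def keepP (prices : List Int) (m j : Nat) : Bool :=
  (List.range' (j+1) (m - (j+1))).all (fun k => prices.getD j 0 ≤ prices.getD k 0)

def stackAt (prices : List Int) (m : Nat) : List (Int × Int) :=
  (((List.range m).filter (fun j => keepP prices m j)).reverse).map
    (fun (j : Nat) => ((j : Int), prices.getD j 0))

def ansAt (prices : List Int) (m : Nat) : List Int :=
  (List.range prices.length).map
    (fun j => if j < m ∧ keepP prices m j = false then target prices j else 0)

theorem countLoop_spec (prices : List Int) (price : Int) :
    ∀ (a : Nat) (c : Int), a ≤ prices.length →
      countLoop prices price (PySem.List.pyRange (a : Int) (prices.length : Int) 1) c =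
        match (List.range' a (prices.length - a)).find?
            (fun j => prices.getD j 0 < price) with
        | some j => c + ((j : Int) - (a : Int)) + 1
        | none => c + ((prices.length : Int) - (a : Int)) := by
  intro a c ha
  obtain ⟨k, hk⟩ : ∃ k, prices.length = a + k := ⟨prices.length - a, by omega⟩
  induction k generalizing a c with
  | zero =>
    rw [PySem.List.pyRange_one_eq_nil (by omega)]
    simp [countLoop, show prices.length - a = 0 by omega]
    omega
  | succ k ih =>
    rw [PySem.List.pyRange_one_cons (by exact_mod_cast (by omega : (a:Int) < (prices.length:Int)))]
    have hr : prices.length - a = k + 1 := by omega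
    have hr2 : prices.length - (a + 1) = k := by omega
    have hcast : ((a : Int) + 1) = ((a + 1 : Nat) : Int) := by push_cast; ring
    rw [hr, List.range'_succ]
    simp only [countLoop, PySem.List.pyGetD_natCast, List.find?_cons]
    by_cases h : prices.getD a 0 < price
    · rw [if_neg (by omega : ¬ price ≤ prices.getD a 0), decide_eq_true h]
      show _ = c + ((a:Int) - (a:Int)) + 1
      omega
    · rw [if_pos (by omega : price ≤ prices.getD a 0), decide_eq_false h, hcast,
        ih (a+1) (c+1) (by omega) (by omega), hr2]
      cases hf : (List.range' (a+1) k).find? (fun j => decide (prices.getD j 0 < price)) with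
      | none => simp only []; push_cast; ring
      | some j => simp only []; push_cast; ring

theorem solution_eq_target (prices : List Int) :
    solution prices = (List.range prices.length).map (target prices) := by
  unfold solution
  rw [PySem.List.pyRange_zero_natCast, List.map_map]
  apply List.map_congr_left
  intro i hi
  have hin : i < prices.length := List.mem_range.mp hi
  simp only [Function.comp_apply, PySem.List.pyGetD_natCast]
  rw [countLoop_spec prices _ i (-1) (le_of_lt hin)]
  unfold target firstDrop
  have hr : prices.length - i = (prices.length - (i+1)) + 1 := by omega
  rw [hr, List.range'_succ, List.find?_cons,
    decide_eq_false (by omega : ¬ prices.getD i 0 < prices.getD i 0)]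
  cases hf : (List.range' (i+1) (prices.length - (i+1))).find?
      (fun j => decide (prices.getD j 0 < prices.getD i 0)) with
  | none => simp only []; ring
  | some j => simp only []; ring

-- ---------- B side ----------

def stackIdx (prices : List Int) (m : Nat) : List Nat :=
  ((List.range m).filter (fun j => keepP prices m j)).reverse

def emb (prices : List Int) (j : Nat) : Int × Int := ((j : Int), prices.getD j 0)

theorem stackAt_eq (prices : List Int) (m : Nat) :
    stackAt prices m = (stackIdx prices m).map (emb prices) := rfl

theorem keepP_le (prices : List Int) (m j : Nat) (h : keepP prices m j = true) :
    ∀ k, j < k → k < m → prices.getD j 0 ≤ prices.getD k 0 := by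
  intro k h1 h2
  have := List.all_eq_true.mp h k (by
    rw [List.mem_range'_1]; omega)
  exact of_decide_eq_true this

theorem keepP_big (prices : List Int) (m j : Nat) (h : m ≤ j + 1) :
    keepP prices m j = true := by
  unfold keepP
  rw [show m - (j+1) = 0 by omega]
  rfl

theorem keepP_succ (prices : List Int) (m j : Nat) (hj : j < m) :
    keepP prices (m+1) j
      = (keepP prices m j && decide (prices.getD j 0 ≤ prices.getD m 0)) := by
  unfold keepP
  rw [show m + 1 - (j+1) = (m - (j+1)) + 1 by omega, List.range'_concat,
    List.all_append, show j + 1 + 1 * (m - (j+1)) = m by omega]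
  simp

theorem popLoop_takeDrop (prices : List Int) (mI p : Int) :
    ∀ (J : List Nat) (ans : List Int),
      popLoop mI p (J.map (emb prices)) ans =
        ((J.dropWhile (fun j => decide (p < prices.getD j 0))).map (emb prices),
         (J.takeWhile (fun j => decide (p < prices.getD j 0))).foldl
           (fun a j => a.set j (mI - (j : Int))) ans) := by
  intro J
  induction J with
  | nil => intro ans; rfl
  | cons j J ih =>
    intro ans
    by_cases h : p < prices.getD j 0
    · simp only [List.map_cons, emb, popLoop, if_pos h, PySem.List.pySetD_natCast,
        List.dropWhile_cons, List.takeWhile_cons, decide_eq_true h]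
      exact ih _
    · simp only [List.map_cons, emb, popLoop, if_neg h,
        List.dropWhile_cons, List.takeWhile_cons, decide_eq_false h]
      rfl

theorem sorted_takeDrop (prices : List Int) (p : Int) :
    ∀ (J : List Nat),
      J.Pairwise (fun a b => prices.getD b 0 ≤ prices.getD a 0) →
      J.dropWhile (fun j => decide (p < prices.getD j 0))
          = J.filter (fun j => decide (prices.getD j 0 ≤ p)) ∧
      J.takeWhile (fun j => decide (p < prices.getD j 0))
          = J.filter (fun j => decide (p < prices.getD j 0)) := by
  intro J
  induction J with
  | nil => intro _; exact ⟨rfl, rfl⟩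
  | cons j J ih =>
    intro hp
    rw [List.pairwise_cons] at hp
    obtain ⟨hj, hJ⟩ := hp
    obtain ⟨ihd, iht⟩ := ih hJ
    by_cases h : p < prices.getD j 0
    · constructor
      · simp only [List.dropWhile_cons, List.filter_cons, decide_eq_true h,
          decide_eq_false (by omega : ¬ prices.getD j 0 ≤ p)]
        exact ihd
      · simp only [List.takeWhile_cons, List.filter_cons, decide_eq_true h]
        rw [if_pos trivial, if_pos trivial, iht]
    · constructor
      · simp only [List.dropWhile_cons, List.filter_cons, decide_eq_false h,
          decide_eq_true (by omega : prices.getD j 0 ≤ p)]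
        rw [if_neg (by simp), if_pos trivial]
        congr 1
        exact (List.filter_eq_self.mpr fun b hb =>
          decide_eq_true (by have := hj b hb; omega)).symm
      · simp only [List.takeWhile_cons, List.filter_cons, decide_eq_false h]
        rw [if_neg (by simp), if_neg (by simp)]
        exact (List.filter_eq_nil_iff.mpr fun b hb => by
          have := hj b hb
          simp only [decide_eq_true_eq]
          omega).symm

theorem stackIdx_sorted (prices : List Int) (m : Nat) :
    (stackIdx prices m).Pairwise (fun a b => prices.getD b 0 ≤ prices.getD a 0) := by
  unfold stackIdx
  rw [List.pairwise_reverse]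
  have h1 : ((List.range m).filter (fun j => keepP prices m j)).Pairwise (· < ·) :=
    List.Pairwise.sublist List.filter_sublist List.pairwise_lt_range
  refine h1.imp_of_mem ?_
  intro a b ha hb hab
  have ha' := List.mem_filter.mp ha
  have hb' := List.mem_filter.mp hb
  exact keepP_le prices m a ha'.2 b hab (List.mem_range.mp hb'.1)

theorem stackIdx_succ (prices : List Int) (m : Nat) :
    stackIdx prices (m+1)
      = m :: (stackIdx prices m).filter
          (fun j => decide (prices.getD j 0 ≤ prices.getD m 0)) := by
  unfold stackIdx
  rw [List.range_succ, List.filter_append,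
    List.filter_congr (l := List.range m)
      (fun j hj => keepP_succ prices m j (List.mem_range.mp hj)),
    ← List.filter_filter, List.reverse_append, ← List.filter_reverse]
  simp [keepP_big prices (m+1) m (by omega)]
  exact List.filter_congr fun j _ => Bool.and_comm _ _

theorem mem_stackIdx (prices : List Int) (m k : Nat) :
    k ∈ stackIdx prices m ↔ k < m ∧ keepP prices m k = true := by
  unfold stackIdx
  simp [List.mem_filter, List.mem_range]

theorem foldl_set_length (f : Nat → Int) :
    ∀ (J : List Nat) (ans : List Int),
      (J.foldl (fun a j => a.set j (f j)) ans).length = ans.length := by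
  intro J
  induction J with
  | nil => intro ans; rfl
  | cons j J ih => intro ans; rw [List.foldl_cons, ih, List.length_set]

theorem foldl_set_getD (f : Nat → Int) :
    ∀ (J : List Nat) (ans : List Int) (k : Nat), k < ans.length →
      (J.foldl (fun a j => a.set j (f j)) ans).getD k 0
        = if k ∈ J then f k else ans.getD k 0 := by
  intro J
  induction J with
  | nil => intro ans k hk; simp
  | cons j J ih =>
    intro ans k hk
    rw [List.foldl_cons, ih _ _ (by rw [List.length_set]; exact hk)]
    by_cases hm : k ∈ J
    · simp [hm]
    · rw [if_neg hm]
      by_cases he : k = j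
      · subst he
        rw [if_pos (by simp), List.getD_eq_getElem _ _ (by rw [List.length_set]; exact hk)]
        simp
      · rw [if_neg (by simp [hm, he]), List.getD, List.getD,
          List.getElem?_set_ne (by omega : j ≠ k)]

theorem target_of_keep (prices : List Int) (k : Nat) (hk : k < prices.length)
    (h : keepP prices prices.length k = true) :
    target prices k = (prices.length : Int) - 1 - (k : Int) := by
  unfold target firstDrop
  rw [List.find?_eq_none.mpr ?_]
  intro j hj
  rw [List.mem_range'_1] at hj
  have := keepP_le prices prices.length k h j (by omega) (by omega)
  simp only [decide_eq_true_eq]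
  omega

theorem target_of_pop (prices : List Int) (k m : Nat) (hk : k < m)
    (hm : m < prices.length) (h : keepP prices m k = true)
    (hlt : prices.getD m 0 < prices.getD k 0) :
    target prices k = (m : Int) - (k : Int) := by
  unfold target firstDrop
  rw [show prices.length - (k+1) = (m - (k+1)) + (prices.length - m) by omega,
    ← List.range'_append_1 (s := k+1) (m := m - (k+1)) (n := prices.length - m),
    show k + 1 + (m - (k+1)) = m by omega, List.find?_append,
    List.find?_eq_none.mpr (fun j hj => by
      rw [List.mem_range'_1] at hj
      have := keepP_le prices m k h j (by omega) (by omega)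
      simp only [decide_eq_true_eq]
      omega),
    Option.none_or,
    show prices.length - m = (prices.length - (m+1)) + 1 by omega,
    List.range'_succ, List.find?_cons, decide_eq_true hlt]

theorem ansAt_length (prices : List Int) (m : Nat) :
    (ansAt prices m).length = prices.length := by
  unfold ansAt; simp

theorem ansAt_getD (prices : List Int) (m k : Nat) (hk : k < prices.length) :
    (ansAt prices m).getD k 0
      = if k < m ∧ keepP prices m k = false then target prices k else 0 := by
  unfold ansAt
  rw [List.getD_eq_getElem _ _ (by simpa using hk)]
  simp

theorem ans_step (prices : List Int) (m : Nat) (hm : m < prices.length) :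
    ((stackIdx prices m).filter
        (fun j => decide (prices.getD m 0 < prices.getD j 0))).foldl
      (fun a j => a.set j ((m : Int) - (j : Int))) (ansAt prices m)
      = ansAt prices (m+1) := by
  apply List.ext_getElem
  · rw [foldl_set_length, ansAt_length, ansAt_length]
  intro k h1 h2
  have hkn : k < prices.length := by
    rw [ansAt_length] at h2; exact h2
  rw [← List.getD_eq_getElem _ 0 h1, ← List.getD_eq_getElem _ 0 h2,
    foldl_set_getD _ _ _ _ (by rw [ansAt_length]; exact hkn),
    ansAt_getD _ _ _ hkn]
  by_cases hmem : k ∈ (stackIdx prices m).filter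
      (fun j => decide (prices.getD m 0 < prices.getD j 0))
  · rw [if_pos hmem]
    have hmem' := List.mem_filter.mp hmem
    have hks := (mem_stackIdx prices m k).mp hmem'.1
    have hlt : prices.getD m 0 < prices.getD k 0 := of_decide_eq_true hmem'.2
    have hkeep1 : keepP prices (m+1) k = false := by
      rw [keepP_succ prices m k hks.1, hks.2, Bool.true_and,
        decide_eq_false (by omega : ¬ prices.getD k 0 ≤ prices.getD m 0)]
    rw [ansAt_getD _ _ _ hkn, if_pos ⟨by omega, hkeep1⟩]
    exact (target_of_pop prices k m hks.1 hm hks.2 hlt).symm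
  · rw [if_neg hmem, ansAt_getD _ _ _ hkn]
    by_cases hkm : k < m
    · by_cases hkeep : keepP prices m k = true
      · have hle : prices.getD k 0 ≤ prices.getD m 0 := by
          by_contra hc
          exact hmem (List.mem_filter.mpr
            ⟨(mem_stackIdx prices m k).mpr ⟨hkm, hkeep⟩, decide_eq_true (by omega)⟩)
        have hkeep1 : keepP prices (m+1) k = true := by
          rw [keepP_succ prices m k hkm, hkeep, decide_eq_true hle]
          rfl
        rw [if_neg (by simp [hkeep]), if_neg (by simp [hkeep1])]
      · have hkeep1 : keepP prices (m+1) k = false := by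
          rw [keepP_succ prices m k hkm]
          simp [hkeep]
        rw [if_pos ⟨hkm, by simpa using hkeep⟩, if_pos ⟨by omega, hkeep1⟩]
    · rw [if_neg (fun h => absurd h.1 hkm), if_neg ?_]
      rintro ⟨hlt1, hfalse⟩
      have hkm' : k = m := by omega
      subst hkm'
      rw [keepP_big prices (k+1) k (le_refl _)] at hfalse
      simp at hfalse

theorem fold_inv (prices : List Int) :
    ∀ (m : Nat), m ≤ prices.length →
      (PySem.List.enumerate prices 0).foldl
        (fun (st : List (Int × Int) × List Int) (ip : Int × Int) =>
          let s2 := popLoop ip.1 ip.2 st.1 st.2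
          ((ip.1, ip.2) :: s2.1, s2.2))
        ([], List.replicate prices.length 0)
      = (PySem.List.enumerate (prices.drop m) (m : Int)).foldl
        (fun (st : List (Int × Int) × List Int) (ip : Int × Int) =>
          let s2 := popLoop ip.1 ip.2 st.1 st.2
          ((ip.1, ip.2) :: s2.1, s2.2))
        (stackAt prices m, ansAt prices m) := by
  intro m
  induction m with
  | zero =>
    intro _
    have h2 : ansAt prices 0 = List.replicate prices.length 0 := by
      unfold ansAt
      rw [List.map_congr_left (fun j _ => by
        rw [if_neg (fun h => absurd h.1 (Nat.not_lt_zero j))] : ∀ j ∈ List.range prices.length, _ = (0:Int)),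
        List.map_const', List.length_range]
    rw [List.drop_zero, Nat.cast_zero, stackAt_eq]
    rw [h2]
    rfl
  | succ m ih =>
    intro hm1
    have hm : m < prices.length := by omega
    rw [ih (by omega), List.drop_eq_getElem_cons hm, PySem.List.enumerate_cons,
      List.foldl_cons]
    have hc : ((m : Int) + 1) = ((m + 1 : Nat) : Int) := by push_cast; ring
    rw [hc]
    congr 1
    have hget : prices[m] = prices.getD m 0 := (List.getD_eq_getElem prices 0 hm).symm
    simp only [hget, stackAt_eq, popLoop_takeDrop,
      (sorted_takeDrop prices (prices.getD m 0) (stackIdx prices m)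
        (stackIdx_sorted prices m)).1,
      (sorted_takeDrop prices (prices.getD m 0) (stackIdx prices m)
        (stackIdx_sorted prices m)).2]
    rw [ans_step prices m hm]
    rw [stackIdx_succ prices m]
    rfl

theorem solution_alt_eq_target (prices : List Int) :
    solution_alt prices = (List.range prices.length).map (target prices) := by
  unfold solution_alt
  rw [fold_inv prices prices.length (le_refl _), List.drop_length]
  simp only [PySem.List.enumerate_nil, List.foldl_nil]
  rw [stackAt_eq, List.foldl_map]
  simp only [emb, PySem.List.pySetD_natCast]
  apply List.ext_getElem
  · rw [foldl_set_length (fun j => (prices.length : Int) - 1 - (j : Int)),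
      ansAt_length, List.length_map, List.length_range]
  intro k h1 h2
  have hkn : k < prices.length := by
    simpa using h2
  rw [← List.getD_eq_getElem _ 0 h1,
    foldl_set_getD (fun j => (prices.length : Int) - 1 - (j : Int)) _ _ _
      (by rw [ansAt_length]; exact hkn),
    List.getElem_map, List.getElem_range]
  by_cases hk : keepP prices prices.length k = true
  · rw [if_pos ((mem_stackIdx prices prices.length k).mpr ⟨hkn, hk⟩)]
    exact (target_of_keep prices k hkn hk).symm
  · rw [if_neg (fun h => hk ((mem_stackIdx prices prices.length k).mp h).2),
      ansAt_getD _ _ _ hkn, if_pos ⟨hkn, by simpa using hk⟩]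

-- ===== VERDICT (by name: the statement is the Claim_ definition above) =====
theorem solution_spec : Claim_equal_solution := by
  intro prices _
  unfold Spec_solution
  rw [solution_eq_target, solution_alt_eq_target]
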